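-- pv_equiv track=rewrite | github.com/june3474/xlmerge | xlmerge/utils.py | list_strip
-- ===== SOURCE A (Python) =====
-- def list_strip(seq):
--     """Remove None and '' on both sides
--
--     Args:
--         seq (list or tuple): list to remove None and ''
--
--     Returns:
--         list: trimmed list
--
--     """
--     if not type(seq) in [list, tuple]:
--         raise TypeError
--
--     if type(seq) is tuple:
--         temp = list(seq)
--     else:
--         temp = seq[0:]  # copy
--
--     while temp:  # forward
--         if temp[0] is None or temp[0] == '':
--             temp.pop(0)
--         else:
--             break
--
--     while temp:  # backward
--         if temp[-1] is None or temp[-1] == '':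
--             temp.pop()
--         else:
--             break
--
--     return temp
-- ===== SOURCE B (Python) =====
-- def list_strip(seq):
--     """Remove None and '' on both sides (single forward pass collecting indices, then one slice)."""
--     if not type(seq) in [list, tuple]:
--         raise TypeError
--
--     idx = [i for i, x in enumerate(seq) if not (x is None or x == '')]
--     if not idx:
--         return []
--     return list(seq[idx[0]:idx[-1] + 1])
-- ===== Notes on version B (the rewrite author's own statement) =====
-- stated objective: simpler
-- what changed: Replaces the two destructive while-loops that pop elements from the front and back of a working copy with a single forward pass collecting the indices of non-empty elements followed by one slice idx[0]:idx[-1]+1.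
import Mathlib
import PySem

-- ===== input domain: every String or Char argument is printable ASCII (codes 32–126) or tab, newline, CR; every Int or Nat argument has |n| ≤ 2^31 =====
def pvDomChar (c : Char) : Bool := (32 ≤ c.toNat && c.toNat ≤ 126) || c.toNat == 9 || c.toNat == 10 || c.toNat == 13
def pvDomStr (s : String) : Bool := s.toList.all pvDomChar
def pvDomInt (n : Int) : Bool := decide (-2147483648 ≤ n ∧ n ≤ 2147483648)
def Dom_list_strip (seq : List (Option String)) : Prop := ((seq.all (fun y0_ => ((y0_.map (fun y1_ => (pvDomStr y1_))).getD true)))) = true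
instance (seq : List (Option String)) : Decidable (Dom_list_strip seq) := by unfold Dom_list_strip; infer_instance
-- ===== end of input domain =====

-- B replaces A's two destructive pop-loops by one forward index-collecting pass and a single slice.
-- A's in-place pops act on a private copy, so there is no caller-visible mutation.

-- 'x is None or x == ""' — the same predicate both Pythons test
def pvEmpty (x : Option String) : Bool := x == none || x == some ""

-- ===== PORT A =====
-- while temp: if temp[0] is None or temp[0] == '': temp.pop(0) else break
def frontLoop : List (Option String) → List (Option String)
  | [] => []
  | x :: xs => if pvEmpty x then frontLoop xs else x :: xs

-- while temp: if temp[-1] is None or temp[-1] == '': temp.pop() else break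
def backLoop (t : List (Option String)) : List (Option String) :=
  if t = [] then t
  else if pvEmpty (t.getLastD none) then backLoop t.dropLast else t
termination_by t.length
decreasing_by
  cases t with
  | nil => simp_all
  | cons a t => simp [List.length_dropLast]

def list_strip (seq : List (Option String)) : List (Option String) :=
  backLoop (frontLoop seq)

-- ===== PORT B =====
-- idx = [i for i, x in enumerate(seq) if not (x is None or x == '')]
-- if not idx: return []
-- return list(seq[idx[0]:idx[-1] + 1])
def list_strip_alt (seq : List (Option String)) : List (Option String) :=
  let idx := ((PySem.List.enumerate seq 0).filter (fun ix => !(pvEmpty ix.2))).map Prod.fst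
  match idx with
  | [] => []
  | i :: rest => PySem.List.slice seq (some i) (some ((i :: rest).getLastD 0 + 1))

-- ===== PRECONDITION & SPEC =====
def Spec_list_strip (seq : List (Option String)) (out : List (Option String)) : Prop := out = list_strip_alt seq
instance (seq : List (Option String)) (out : List (Option String)) : Decidable (Spec_list_strip seq out) := by unfold Spec_list_strip; infer_instance

-- ===== CLAIM (what is proved, stated in full; the proofs are below) =====
def Claim_equal_list_strip : Prop := ∀ (seq : List (Option String)), Dom_list_strip seq → Spec_list_strip seq (list_strip seq)

-- ===== LEMMAS AND PROOFS =====

-- the nat indices of the non-empty elements, proof-side characterisation of B's comprehension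
def idxs : List (Option String) → List Nat
  | [] => []
  | x :: xs => if pvEmpty x then (idxs xs).map (· + 1) else 0 :: (idxs xs).map (· + 1)

theorem frontLoop_eq (l : List (Option String)) : frontLoop l = l.dropWhile pvEmpty := by
  induction l with
  | nil => rfl
  | cons x xs ih => by_cases h : pvEmpty x <;> simp [frontLoop, List.dropWhile, h, ih]

theorem backLoop_eq (l : List (Option String)) :
    backLoop l = (l.reverse.dropWhile pvEmpty).reverse := by
  induction l using List.reverseRecOn with
  | nil => simp [backLoop]
  | append_singleton l a ih =>
    rw [backLoop]
    by_cases h : pvEmpty a <;>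
      simp [h, ih]

theorem enum_filter_eq (l : List (Option String)) (s : Int) :
    ((PySem.List.enumerate l s).filter (fun ix => !(pvEmpty ix.2))).map Prod.fst
      = (idxs l).map (fun k : Nat => s + k) := by
  induction l generalizing s with
  | nil => simp [PySem.List.enumerate_nil, idxs]
  | cons x xs ih =>
    by_cases h : pvEmpty x <;>
      simp [PySem.List.enumerate_cons, h, idxs, ih, Function.comp] <;>
      (intro a _; ring)

theorem idxs_lt (l : List (Option String)) : ∀ i ∈ idxs l, i < l.length := by
  induction l with
  | nil => simp [idxs]
  | cons x xs ih =>
    intro i hi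
    by_cases h : pvEmpty x <;> simp [idxs, h] at hi
    · obtain ⟨a, ha, rfl⟩ := hi
      have := ih a ha; simp; omega
    · rcases hi with rfl | ⟨a, ha, rfl⟩
      · simp
      · have := ih a ha; simp; omega

theorem getLastD_mem {α : Type} (L : List α) (d : α) (h : L ≠ []) : L.getLastD d ∈ L := by
  induction L with
  | nil => exact absurd rfl h
  | cons x xs ih =>
    cases xs with
    | nil => simp [List.getLastD]
    | cons y ys =>
      have := ih (by simp)
      simp at this ⊢
      tauto

theorem idxs_concat (l : List (Option String)) (a : Option String) :
    idxs (l ++ [a]) = idxs l ++ (if pvEmpty a then [] else [l.length]) := by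
  induction l with
  | nil => by_cases h : pvEmpty a <;> simp [idxs, h]
  | cons x xs ih =>
    by_cases h : pvEmpty x <;> by_cases ha : pvEmpty a <;>
      simp [idxs, h, ha, ih]

theorem getLastD_cast (L : List Nat) : ∀ (z : Nat),
    (L.map (fun k : Nat => (k : Int))).getLastD (z : Int) = ((L.getLastD z : Nat) : Int) := by
  induction L with
  | nil => intro z; simp
  | cons u us ih =>
    intro z
    simp only [List.map_cons, List.getLastD_cons]
    exact ih u

theorem getLastD_map_add_one (L : List Nat) : ∀ (z : Nat),
    (L.map (· + 1)).getLastD (z + 1) = L.getLastD z + 1 := by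
  induction L with
  | nil => intro z; simp
  | cons u us ih =>
    intro z
    simp only [List.map_cons, List.getLastD_cons]
    exact ih u

-- right strip characterised by the last non-empty index
theorem rstrip_eq_take (l : List (Option String)) (h : idxs l ≠ []) :
    (l.reverse.dropWhile pvEmpty).reverse = l.take ((idxs l).getLastD 0 + 1) := by
  induction l using List.reverseRecOn with
  | nil => simp [idxs] at h
  | append_singleton l a ih =>
    by_cases ha : pvEmpty a
    · have h' : idxs (l ++ [a]) = idxs l := by simp [idxs_concat, ha]
      rw [h'] at h ⊢
      have hlt : (idxs l).getLastD 0 < l.length :=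
        idxs_lt l _ (getLastD_mem _ _ h)
      rw [List.reverse_append, List.reverse_singleton, List.singleton_append,
        List.dropWhile_cons_of_pos ha, ih h,
        List.take_append_of_le_length (by omega)]
    · have h' : idxs (l ++ [a]) = idxs l ++ [l.length] := by simp [idxs_concat, ha]
      rw [h', List.getLastD_concat, List.reverse_append, List.reverse_singleton,
        List.singleton_append, List.dropWhile_cons_of_neg ha]
      simp [List.take_of_length_le]

-- B in terms of idxs, drop and take
theorem alt_eq_aux (l : List (Option String)) :
    list_strip_alt l = match idxs l with
      | [] => []
      | i :: rest => (l.drop i).take ((i :: rest).getLastD 0 + 1 - i) := by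
  unfold list_strip_alt
  rw [enum_filter_eq l 0]
  have map0 : (idxs l).map (fun k : Nat => (0 : Int) + k)
      = (idxs l).map (fun k : Nat => (k : Int)) := by simp
  rw [map0]
  cases hx : idxs l with
  | nil => simp
  | cons i rest =>
    simp only [List.map_cons]
    have h2 : (((i : Nat) : Int) :: rest.map (fun k : Nat => (k : Int))).getLastD 0
        = (((i :: rest).getLastD 0 : Nat) : Int) := by
      simpa using getLastD_cast (i :: rest) 0
    rw [h2,
      show ((((i :: rest).getLastD 0 : Nat) : Int) + 1)
          = (((i :: rest).getLastD 0 + 1 : Nat) : Int) by push_cast; ring,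
      PySem.List.slice_natCast]

theorem main_eq (l : List (Option String)) :
    list_strip_alt l = ((l.dropWhile pvEmpty).reverse.dropWhile pvEmpty).reverse := by
  induction l with
  | nil => simp [list_strip_alt, PySem.List.enumerate_nil]
  | cons x xs ih =>
    rw [alt_eq_aux] at ih ⊢
    by_cases h : pvEmpty x
    · rw [List.dropWhile_cons_of_pos h]
      rw [← ih]
      show (match idxs (x :: xs) with
        | [] => []
        | i :: rest => ((x :: xs).drop i).take ((i :: rest).getLastD 0 + 1 - i)) = _
      have hx : idxs (x :: xs) = (idxs xs).map (· + 1) := by simp [idxs, h]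
      rw [hx]
      cases hr : idxs xs with
      | nil => simp
      | cons i rest =>
        simp only [List.map_cons]
        have hg : ((i + 1) :: rest.map (· + 1)).getLastD 0 = (i :: rest).getLastD 0 + 1 := by
          simpa using getLastD_map_add_one (i :: rest) 0
        rw [hg]
        simp
    · rw [List.dropWhile_cons_of_neg h]
      have hx : idxs (x :: xs) = 0 :: (idxs xs).map (· + 1) := by simp [idxs, h]
      have hne : idxs (x :: xs) ≠ [] := by rw [hx]; simp
      rw [rstrip_eq_take _ hne]
      show (match idxs (x :: xs) with
        | [] => []
        | i :: rest => ((x :: xs).drop i).take ((i :: rest).getLastD 0 + 1 - i)) = _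
      rw [hx]
      simp

-- ===== VERDICT (by name: the statement is the Claim_ definition above) =====
theorem list_strip_spec : Claim_equal_list_strip := by
  intro seq _
  unfold Spec_list_strip list_strip
  rw [frontLoop_eq, backLoop_eq, main_eq]
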